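-- pv_equiv track=rewrite | github.com/moti9/iCode | cp/info_med1.py | count_KModulo_numbers
-- ===== SOURCE A (Python) =====
-- def count_KModulo_numbers(N, K):
--     count = 0
--
--     for num in range(1, N+1):
--         if num % K == 0:
--             even_count = 0
--             odd_count = 0
--             for digit in str(num):
--                 if int(digit) % 2 == 0:
--                     even_count += 1
--                 else:
--                     odd_count += 1
--
--             if even_count == odd_count:
--                 count += 1
--
--     return count
-- ===== SOURCE B (Python) =====
-- def count_KModulo_numbers(N, K):
--     # Visits only the multiples of |K| by striding, and checks the even/odd
--     # digit balance arithmetically instead of via str().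
--     step = abs(K)
--     count = 0
--     for num in range(step, N + 1, step):
--         bal = 0
--         n = num
--         while n > 0:
--             bal += 1 if (n % 10) % 2 == 0 else -1
--             n //= 10
--         if bal == 0:
--             count += 1
--     return count
-- ===== Notes on version B (the rewrite author's own statement) =====
-- stated objective: faster
-- what changed: B iterates only over the multiples of |K| with a strided range instead of scanning 1..N and testing num % K, and computes the even/odd digit balance arithmetically (n % 10, n //= 10) instead of converting each number to a string.
-- outside the precondition, e.g. on count_KModulo_numbers(0, 0): A returns 0, B raises ValueError
import Mathlib
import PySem

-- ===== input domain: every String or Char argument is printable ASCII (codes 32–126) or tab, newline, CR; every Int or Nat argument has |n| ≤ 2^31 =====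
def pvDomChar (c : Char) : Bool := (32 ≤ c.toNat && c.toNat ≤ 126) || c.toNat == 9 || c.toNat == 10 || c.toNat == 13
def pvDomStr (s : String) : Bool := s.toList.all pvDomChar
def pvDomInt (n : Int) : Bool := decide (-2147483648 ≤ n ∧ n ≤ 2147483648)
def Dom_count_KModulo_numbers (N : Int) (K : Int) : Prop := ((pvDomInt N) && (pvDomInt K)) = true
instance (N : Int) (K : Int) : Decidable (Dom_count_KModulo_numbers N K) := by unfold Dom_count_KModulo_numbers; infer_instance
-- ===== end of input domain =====

-- B strides over the multiples of |K| and checks the digit balance arithmetically;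
-- the equivalence is about the return value (neither program mutates anything).

-- ===== PORT A =====
def count_KModulo_numbers (N : Int) (K : Int) : Int :=
  (PySem.List.pyRange 1 (N + 1) 1).foldl
    (fun count num =>
      if PySem.Int.mod num K == 0 then
        let p :=
          (PySem.Int.toChars num).foldl
            (fun (s : Int × Int) digit =>
              -- int(digit): exact here, each digit of str(num) is a decimal digit
              if PySem.Int.mod ((PySem.Int.ofChars? [digit]).getD 0) 2 == 0 then
                (s.1 + 1, s.2)
              else
                (s.1, s.2 + 1))
            (0, 0)
        if p.1 == p.2 then count + 1 else count
      else count)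
    0

-- ===== PORT B =====
-- the 'while n > 0' balance loop of Source B
def pvBal (n : Int) : Int :=
  if h : 0 < n then
    (if PySem.Int.mod (PySem.Int.mod n 10) 2 == 0 then (1 : Int) else -1)
      + pvBal (PySem.Int.floordiv n 10)
  else 0
termination_by n.toNat
decreasing_by
  have : PySem.Int.floordiv n 10 = n / 10 := PySem.Int.floordiv_eq_ediv_of_pos (b := 10) (by norm_num)
  rw [this]; omega

def count_KModulo_numbers_alt (N : Int) (K : Int) : Int :=
  (PySem.List.pyRange |K| (N + 1) |K|).foldl
    (fun count num => if pvBal num == 0 then count + 1 else count) 0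

-- ===== PRECONDITION & SPEC =====
-- Pre_ excludes exactly K = 0: there A raises ZeroDivisionError for N >= 1 and returns 0
-- for N < 1 only because the loop body never runs, while B's range(step=0) raises ValueError.
def Pre_count_KModulo_numbers (N : Int) (K : Int) : Prop := K ≠ 0
instance (N : Int) (K : Int) : Decidable (Pre_count_KModulo_numbers N K) := by
  unfold Pre_count_KModulo_numbers; infer_instance

def pvWitness_count_KModulo_numbers : Int × Int := (24, 2)

def Spec_count_KModulo_numbers (N : Int) (K : Int) (out : Int) : Prop := out = count_KModulo_numbers_alt N K
instance (N : Int) (K : Int) (out : Int) : Decidable (Spec_count_KModulo_numbers N K out) := by unfold Spec_count_KModulo_numbers; infer_instance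

-- ===== CLAIM (what is proved, stated in full; the proofs are below) =====
def Claim_equal_count_KModulo_numbers : Prop := ∀ (N : Int) (K : Int), Dom_count_KModulo_numbers N K → Pre_count_KModulo_numbers N K → Spec_count_KModulo_numbers N K (count_KModulo_numbers N K)

-- ===== LEMMAS AND PROOFS =====

-- strictly increasing lists with the same members are equal
theorem pvEqOfSortedMem (l1 l2 : List Int) (h1 : l1.Pairwise (· < ·)) (h2 : l2.Pairwise (· < ·))
    (h : ∀ x, x ∈ l1 ↔ x ∈ l2) : l1 = l2 := by
  have hp : l1.Perm l2 := by
    refine List.perm_of_nodup_nodup_toFinset_eq (h1.nodup) (h2.nodup) ?_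
    ext x; simp [h x]
  exact hp.eq_of_pairwise (fun a b _ _ hab hba => le_antisymm hab hba) (h1.imp le_of_lt) (h2.imp le_of_lt)

theorem pvPyRangePairwise (a b s : Int) (hs : 0 < s) : (PySem.List.pyRange a b s).Pairwise (· < ·) := by
  rw [PySem.List.pyRange_of_pos a b hs]
  refine List.Pairwise.map _ ?_ (List.pairwise_lt_range)
  intro i j hij
  have : (i : Int) < j := by exact_mod_cast hij
  nlinarith

-- the multiples of K in [1, N] are exactly the strided range B walks
theorem pvFiltEq (N K : Int) (hK : K ≠ 0) :
    (PySem.List.pyRange 1 (N + 1) 1).filter (fun x => PySem.Int.mod x K == 0)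
      = PySem.List.pyRange |K| (N + 1) |K| := by
  have hs : (0 : Int) < |K| := abs_pos.mpr hK
  apply pvEqOfSortedMem
  · exact (pvPyRangePairwise _ _ _ one_pos).filter _
  · exact pvPyRangePairwise _ _ _ hs
  · intro x
    simp only [List.mem_filter, PySem.List.mem_pyRange_iff_of_pos one_pos,
      PySem.List.mem_pyRange_iff_of_pos hs, beq_iff_eq, PySem.Int.mod_eq_zero_iff_dvd]
    constructor
    · rintro ⟨⟨h1, h2, -⟩, hd⟩
      have hd' : |K| ∣ x := (abs_dvd _ _).mpr hd
      exact ⟨Int.le_of_dvd (by omega) hd', h2, dvd_sub hd' dvd_rfl⟩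
    · rintro ⟨h1, h2, hd⟩
      have hd' : |K| ∣ x := by
        have := dvd_add hd (dvd_refl |K|); simpa using this
      exact ⟨⟨by omega, h2, one_dvd _⟩, (abs_dvd _ _).mp hd'⟩

-- Nat.toDigitsCore bookkeeping (accumulator and fuel), giving the structural split of str(n)
theorem pvCoreAcc (f : Nat) : ∀ (n : Nat) (ds : List Char),
    Nat.toDigitsCore 10 f n ds = Nat.toDigitsCore 10 f n [] ++ ds := by
  induction f with
  | zero => intro n ds; simp [Nat.toDigitsCore]
  | succ f ih =>
    intro n ds
    simp only [Nat.toDigitsCore]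
    by_cases h : n / 10 = 0
    · simp [h]
    · simp only [if_neg h]
      rw [ih (n / 10) ((n % 10).digitChar :: ds), ih (n / 10) [(n % 10).digitChar]]
      simp

theorem pvCoreFuel : ∀ (n f f' : Nat), n < f → n < f' → ∀ ds,
    Nat.toDigitsCore 10 f n ds = Nat.toDigitsCore 10 f' n ds := by
  intro n
  induction n using Nat.strong_induction_on with
  | _ n ih =>
    intro f f' hf hf' ds
    match f, f' with
    | f + 1, f' + 1 =>
      simp only [Nat.toDigitsCore]
      by_cases h : n / 10 = 0
      · simp [h]
      · simp only [if_neg h]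
        have hn : 0 < n := by
          rcases Nat.eq_zero_or_pos n with h0 | h0
          · exact absurd (by simp [h0]) h
          · exact h0
        exact ih (n / 10) (Nat.div_lt_self hn (by norm_num)) f f' (by omega) (by omega) _

theorem pvToDigitsSplit (n : Nat) (h : 10 ≤ n) :
    Nat.toDigits 10 n = Nat.toDigits 10 (n / 10) ++ [(n % 10).digitChar] := by
  have h10 : n / 10 ≠ 0 := by omega
  rw [Nat.toDigits, Nat.toDigitsCore]
  simp only [if_neg h10]
  rw [pvCoreFuel (n / 10) n (n / 10 + 1) (by omega) (by omega), Nat.toDigits, pvCoreAcc]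

theorem pvToDigitsSmall (n : Nat) (h : n < 10) : Nat.toDigits 10 n = [n.digitChar] := by
  rw [Nat.toDigits, Nat.toDigitsCore]
  simp [Nat.div_eq_of_lt h, Nat.mod_eq_of_lt h]

-- A's per-character parity test, named for the proofs
def pvCondE (c : Char) : Bool := PySem.Int.mod ((PySem.Int.ofChars? [c]).getD 0) 2 == 0

theorem pvCondE_digitChar (d : Nat) (hd : d < 10) : pvCondE d.digitChar = decide (d % 2 = 0) := by
  interval_cases d <;> decide

theorem pvBal_pos (n : Int) (h : 0 < n) :
    pvBal n = (if PySem.Int.mod (PySem.Int.mod n 10) 2 == 0 then (1 : Int) else -1)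
      + pvBal (PySem.Int.floordiv n 10) := by
  rw [pvBal]; simp [h]

-- even-digit count minus odd-digit count of str(m) is B's arithmetic balance
theorem pvBalBridge : ∀ (m : Nat), 0 < m →
    ((Nat.toDigits 10 m).countP pvCondE : Int) - ((Nat.toDigits 10 m).countP (fun c => !pvCondE c) : Int)
      = pvBal (m : Int) := by
  intro m
  induction m using Nat.strong_induction_on with
  | _ m ih =>
    intro hm
    have hmod : PySem.Int.mod ((m : Int)) 10 = ((m % 10 : Nat) : Int) := PySem.Int.mod_natCast m 10
    have hmod2 : PySem.Int.mod ((m % 10 : Nat) : Int) 2 = ((m % 10 % 2 : Nat) : Int) := PySem.Int.mod_natCast _ 2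
    have hdiv : PySem.Int.floordiv ((m : Int)) 10 = ((m / 10 : Nat) : Int) := PySem.Int.floordiv_natCast m 10
    rw [pvBal_pos _ (by exact_mod_cast hm), hmod, hmod2, hdiv]
    by_cases h10 : m < 10
    · rw [pvToDigitsSmall m h10, Nat.div_eq_of_lt h10]
      have : pvBal ((0 : Nat) : Int) = 0 := by rw [pvBal]; simp
      rw [Nat.mod_eq_of_lt h10]
      simp only [List.countP_cons, List.countP_nil, pvCondE_digitChar m h10, this]
      by_cases hp : m % 2 = 0 <;> simp [hp] <;> omega
    · rw [not_lt] at h10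
      rw [pvToDigitsSplit m h10]
      have hd10 : m % 10 < 10 := Nat.mod_lt _ (by norm_num)
      have hrec := ih (m / 10) (Nat.div_lt_self hm (by norm_num)) (by omega)
      rw [← hrec]
      simp only [List.countP_append, List.countP_cons, List.countP_nil,
        pvCondE_digitChar _ hd10]
      rcases Nat.mod_two_eq_zero_or_one (m % 10) with h2 | h2 <;>
        simp [h2] <;> push_cast <;> omega

-- A's inner string loop computes the even/odd digit counts of str(num)
theorem pvInner (num : Int) (h : 1 ≤ num) :
    ((PySem.Int.toChars num).foldl
      (fun (s : Int × Int) digit =>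
        if PySem.Int.mod ((PySem.Int.ofChars? [digit]).getD 0) 2 == 0 then (s.1 + 1, s.2)
        else (s.1, s.2 + 1)) (0, 0))
      = (((Nat.toDigits 10 num.toNat).countP pvCondE : Int),
         ((Nat.toDigits 10 num.toNat).countP (fun c => !pvCondE c) : Int)) := by
  have hchars : PySem.Int.toChars num = Nat.toDigits 10 num.toNat := by
    simp [PySem.Int.toChars, not_lt.mpr (by omega : (0 : Int) ≤ num)]
  have hbody : (fun (s : Int × Int) digit =>
      if PySem.Int.mod ((PySem.Int.ofChars? [digit]).getD 0) 2 == 0 then (s.1 + 1, s.2)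
      else (s.1, s.2 + 1))
      = (fun (s : Int × Int) digit =>
          ((fun (a : Int) c => if pvCondE c then a + 1 else a) s.1 digit,
           (fun (a : Int) c => if pvCondE c then a else a + 1) s.2 digit)) := by
    funext s digit
    by_cases hc : (PySem.Int.mod ((PySem.Int.ofChars? [digit]).getD 0) 2 == 0) = true
    · simp only [pvCondE, if_pos hc]
    · simp only [pvCondE, if_neg hc]
  rw [hchars, hbody, PySem.List.foldl_prod_mk
    (f := fun (a : Int) c => if pvCondE c then a + 1 else a)
    (g := fun (a : Int) c => if pvCondE c then a else a + 1)]
  have h1 : (Nat.toDigits 10 num.toNat).foldl (fun (a : Int) c => if pvCondE c then a + 1 else a) 0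
      = 0 + ((Nat.toDigits 10 num.toNat).countP pvCondE : Int) :=
    PySem.List.foldl_if_add_one pvCondE _ _
  have h2 : (Nat.toDigits 10 num.toNat).foldl (fun (a : Int) c => if pvCondE c then a else a + 1) 0
      = 0 + ((Nat.toDigits 10 num.toNat).countP (fun c => !pvCondE c) : Int) := by
    rw [PySem.List.foldl_congr_mem (Nat.toDigits 10 num.toNat)
      (fun (a : Int) c => if pvCondE c then a else a + 1)
      (fun (a : Int) c => if !pvCondE c then a + 1 else a) 0
      (by intro acc c _; by_cases hc : pvCondE c <;> simp [hc])]
    exact PySem.List.foldl_if_add_one _ _ _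
  rw [h1, h2]
  simp

-- ===== VERDICT (by name: the statement is the Claim_ definition above) =====
theorem count_KModulo_numbers_spec : Claim_equal_count_KModulo_numbers := by
  intro N K _ hK
  unfold Spec_count_KModulo_numbers
  unfold Pre_count_KModulo_numbers at hK
  have hA : count_KModulo_numbers N K
      = (PySem.List.pyRange 1 (N + 1) 1).foldl
          (fun count num =>
            if (PySem.Int.mod num K == 0 && (pvBal num == 0)) then count + 1 else count) 0 := by
    unfold count_KModulo_numbers
    apply PySem.List.foldl_congr_mem
    intro acc num hmem
    have h1 : 1 ≤ num := ((PySem.List.mem_pyRange_iff_of_pos one_pos num).mp hmem).1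
    have hpair := pvInner num h1
    have hm : 0 < num.toNat := by omega
    have hb := pvBalBridge num.toNat hm
    rw [(by omega : ((num.toNat : Int)) = num)] at hb
    by_cases hd : PySem.Int.mod num K == 0
    · simp only [hd, Bool.true_and, if_true, hpair]
      have hc : ((((Nat.toDigits 10 num.toNat).countP pvCondE : Int))
          == ((Nat.toDigits 10 num.toNat).countP (fun c => !pvCondE c) : Int))
          = (pvBal num == 0) := by
        rw [Bool.eq_iff_iff]
        simp only [beq_iff_eq]
        omega
      rw [hc]
    · rw [Bool.not_eq_true] at hd
      simp only [hd, Bool.false_and, Bool.false_eq_true, if_false]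
  have hB : count_KModulo_numbers_alt N K
      = 0 + ((PySem.List.pyRange |K| (N + 1) |K|).countP (fun num => pvBal num == 0) : Int) := by
    unfold count_KModulo_numbers_alt
    exact PySem.List.foldl_if_add_one _ _ _
  rw [hA, PySem.List.foldl_if_add_one, hB]
  rw [← pvFiltEq N K hK, List.countP_filter]
  have hpq : (fun num => PySem.Int.mod num K == 0 && (pvBal num == 0))
      = (fun a => (pvBal a == 0) && (PySem.Int.mod a K == 0)) := by
    funext a; rw [Bool.and_comm]
  rw [hpq]
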